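-- pv_equiv track=rewrite | github.com/awellisz/BS-Poker | main.py | brimminghouse
-- ===== SOURCE A (Python) =====
-- from collections import Counter
-- import itertools
--
-- def contains_all(a, b):
--     """
--     Utility function
--     Check if array A contains all elements of B, including with repeated values.
--     E.g. containsall([11, 4, 6], [4, 4]) -> False
--     E.g. containsall([11, 4, 6], [6, 11]) -> True
--     """
--     counter_a = Counter(a)
--     counter_b = Counter(b)
--     return all(v <= counter_a[k] for k, v in counter_b.items())
--
-- def remove_match(hand, match):
--     """
--     Utility function
--     Remove the list 'match' from the list 'hand'
--     E.g. remove_match([3, 6, 8, 1, 1], [1, 6]) -> [3, 8, 1]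
--     (actually returns a Counter object instead of a list but example is just for clarity,
--     the returned object effectively functions as a list in the hand-checking functions below)
--     """
--     new_hand = Counter(hand)
--     new_hand.subtract(Counter(match))
--     return new_hand
--
-- def fourok(hand, c):
--     """
--     Return true if there is a four of a kind of the given card
--     """
--     # All possible fours of a kind
--     # Probably some way to automate this but it's simple enough to hardcode
--     matches = [[c, c, c, c], [c, c, c, 2], [c, c, 2, 2], [c, 2, 2, 2], [2, 2, 2, 2]]
--
--     for match in matches:
--         if contains_all(hand, match):
--             return True
--     return False
--
-- def brimminghouse(hand, c):
--     """
--     Return true if brimming house of the given hand (6 of a kind + 4 of a kind of any other card)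
--     """
--
--     if (len(hand) < 10):
--         return False
--
--     sixok_matches = [[c, c, c, c, 2, 2], [c, c, c, 2, 2, 2], [c, c, 2, 2, 2, 2]]
--     for match in sixok_matches:
--         if contains_all(hand, match):
--             new_hand = remove_match(hand, match)
--             for i in itertools.chain(range(2, c), range(c + 1, 15)):
--                 if fourok(new_hand, i):
--                     return True
--     return False
-- ===== SOURCE B (Python) =====
-- from collections import Counter
--
-- def brimminghouse(hand, c):
--     """Brimming house: a six of a kind of card c (deuces wild) together with a
--     four of a kind of some other card from the leftover cards.
--
--     Greedy choice: use as many natural c's as allowed (at most four, the rest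
--     of the six being wilds; all six are wilds when c is 2 itself).  Keeping the
--     maximum number of wilds spare can only help the remaining four of a kind,
--     so only this one split needs checking."""
--     if len(hand) < 10:
--         return False
--     counts = Counter(hand)
--     naturals = 6 if c == 2 else min(4, counts[c])
--     wilds_used = 6 - (0 if c == 2 else naturals)
--     if naturals < 2 or counts[c] < naturals or counts[2] < wilds_used:
--         return False
--     spare = counts[2] - wilds_used
--     if spare >= 4:
--         return True  # four spare wilds alone form the four of a kind
--     # otherwise some other rank must supply the missing natural cards
--     need = 4 - spare
--     return any(r != 2 and (2 <= r < c or c < r < 15) and n >= need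
--                for r, n in counts.items())
-- ===== Notes on version B (the rewrite author's own statement) =====
-- stated objective: simpler
-- what changed: B replaces A's enumeration of the three c/wild six-of-a-kind splits (each rebuilding Counters and running fourok's five-pattern scan over every rank 2..14) by a single greedy split -- take the maximum number of natural c's, which is optimal because spare wilds only help the four of a kind -- followed by one pass over the hand's distinct rank counts; one counting pass instead of repeated Counter builds makes it measurably faster.
import Mathlib
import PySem

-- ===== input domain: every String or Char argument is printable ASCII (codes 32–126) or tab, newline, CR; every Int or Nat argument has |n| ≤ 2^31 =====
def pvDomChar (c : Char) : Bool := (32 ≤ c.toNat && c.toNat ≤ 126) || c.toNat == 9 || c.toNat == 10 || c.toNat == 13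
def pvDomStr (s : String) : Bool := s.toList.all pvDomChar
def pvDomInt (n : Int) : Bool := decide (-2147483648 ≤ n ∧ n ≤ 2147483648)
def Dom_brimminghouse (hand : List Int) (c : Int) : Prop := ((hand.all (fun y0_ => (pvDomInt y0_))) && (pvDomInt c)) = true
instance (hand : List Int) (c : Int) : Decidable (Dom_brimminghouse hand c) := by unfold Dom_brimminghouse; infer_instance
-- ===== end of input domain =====

-- B replaces A's enumeration of the three c/wild splits (each with its own Counter
-- rebuilds and five-pattern four-of-a-kind scan over every rank) by a single greedy
-- split plus one pass over the hand's distinct rank counts (objective: simpler).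

-- ===== PORT A =====
-- contains_all(a, b) for a a list (Counter(a) counts it)
def containsAll (a b : List Int) : Bool :=
  (PySem.Dict.counter b).items.all (fun kv => decide (kv.2 ≤ (PySem.Dict.counter a).getD kv.1 0))

-- contains_all(a, b) as called from fourok, where a is already a Counter (Counter(a) copies it)
def containsAllC (a : PySem.Dict Int Int) (b : List Int) : Bool :=
  (PySem.Dict.counter b).items.all (fun kv => decide (kv.2 ≤ a.getD kv.1 0))

-- remove_match: Counter(hand).subtract(Counter(match)) — per key (k, v) of Counter(match),
-- new_hand[k] = new_hand.get(k, 0) - v (values may go negative; exact subtract semantics)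
def removeMatch (hand matchL : List Int) : PySem.Dict Int Int :=
  (PySem.Dict.counter matchL).items.foldl
    (fun d kv => d.insert kv.1 (d.getD kv.1 0 - kv.2)) (PySem.Dict.counter hand)

def fourok (hand : PySem.Dict Int Int) (c : Int) : Bool :=
  ([[c, c, c, c], [c, c, c, 2], [c, c, 2, 2], [c, 2, 2, 2], [2, 2, 2, 2]] : List (List Int)).any
    (fun m => containsAllC hand m)

def brimminghouse (hand : List Int) (c : Int) : Bool :=
  if hand.length < 10 then false
  else
    ([[c, c, c, c, 2, 2], [c, c, c, 2, 2, 2], [c, c, 2, 2, 2, 2]] : List (List Int)).any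
      (fun m =>
        containsAll hand m &&
          (PySem.List.pyRange 2 c 1 ++ PySem.List.pyRange (c + 1) 15 1).any
            (fun i => fourok (removeMatch hand m) i))

-- ===== PORT B =====
def brimminghouse_alt (hand : List Int) (c : Int) : Bool :=
  if hand.length < 10 then false
  else
    let counts := PySem.Dict.counter hand
    let naturals : Int := if c = 2 then 6 else min 4 (counts.getD c 0)
    let wildsUsed : Int := 6 - (if c = 2 then 0 else naturals)
    if naturals < 2 || counts.getD c 0 < naturals || counts.getD 2 0 < wildsUsed then false
    else
      let spare := counts.getD 2 0 - wildsUsed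
      if 4 ≤ spare then true
      else
        let need := 4 - spare
        counts.items.any (fun rn =>
          !(rn.1 == 2) &&
            ((decide (2 ≤ rn.1) && decide (rn.1 < c)) ||
              (decide (c < rn.1) && decide (rn.1 < 15))) &&
            decide (need ≤ rn.2))

-- ===== PRECONDITION & SPEC =====
def Spec_brimminghouse (hand : List Int) (c : Int) (out : Bool) : Prop := out = brimminghouse_alt hand c
instance (hand : List Int) (c : Int) (out : Bool) : Decidable (Spec_brimminghouse hand c out) := by unfold Spec_brimminghouse; infer_instance

-- ===== CLAIM (what is proved, stated in full; the proofs are below) =====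
def Claim_equal_brimminghouse : Prop := ∀ (hand : List Int) (c : Int), Dom_brimminghouse hand c → Spec_brimminghouse hand c (brimminghouse hand c)

-- ===== LEMMAS AND PROOFS =====

-- A's six-of-a-kind satisfaction test and four-of-a-kind body in count arithmetic
def satB (hand : List Int) (c k : Int) : Bool :=
  if c = 2 then decide ((hand.count 2 : Int) ≥ 6)
  else decide ((hand.count c : Int) ≥ k) && decide ((hand.count 2 : Int) ≥ 6 - k)

def rB (hand : List Int) (c k x : Int) : Int :=
  (hand.count x : Int) - (if x = c then k else 0) - (if x = 2 then 6 - k else 0)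

def bodyB (hand : List Int) (c k i : Int) : Bool :=
  if i = 2 then decide (rB hand c k 2 ≥ 4)
  else decide (rB hand c k 2 ≥ 4 - max 0 (min 4 (rB hand c k i)))

theorem containsAll_iff (a b : List Int) :
    containsAll a b = true ↔ ∀ x ∈ b, (b.count x : Int) ≤ (a.count x : Int) := by
  simp [containsAll, PySem.Dict.items_counter, PySem.Dict.getD_counter, List.all_eq_true,
    PySem.Set.mem_ofList]

theorem containsAllC_iff (d : PySem.Dict Int Int) (b : List Int) :
    containsAllC d b = true ↔ ∀ x ∈ b, (b.count x : Int) ≤ d.getD x 0 := by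
  simp [containsAllC, PySem.Dict.items_counter, List.all_eq_true, PySem.Set.mem_ofList]

theorem getD_foldl_sub_not_mem (l : List (Int × Int)) (d : PySem.Dict Int Int) (x : Int)
    (h : ∀ kv ∈ l, kv.1 ≠ x) :
    (l.foldl (fun d kv => d.insert kv.1 (d.getD kv.1 0 - kv.2)) d).getD x 0 = d.getD x 0 := by
  induction l generalizing d with
  | nil => rfl
  | cons kv t ih =>
    simp only [List.foldl_cons]
    rw [ih _ (fun p hp => h p (List.mem_cons_of_mem _ hp)),
      PySem.Dict.getD_insert_of_ne _ _ _ ((h kv List.mem_cons_self).symm)]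

theorem getD_foldl_sub_keys (ks : List Int) (g : Int → Int) (d : PySem.Dict Int Int) (x : Int)
    (h : ks.Nodup) :
    ((ks.map (fun k => (k, g k))).foldl (fun d kv => d.insert kv.1 (d.getD kv.1 0 - kv.2)) d).getD x 0
      = d.getD x 0 - (if x ∈ ks then g x else 0) := by
  induction ks generalizing d with
  | nil => simp
  | cons k t ih =>
    simp only [List.map_cons, List.foldl_cons, List.nodup_cons] at *
    by_cases hk : k = x
    · subst hk
      rw [getD_foldl_sub_not_mem _ _ _ (by
          intro kv hkv
          simp only [List.mem_map] at hkv
          obtain ⟨y, hy, rfl⟩ := hkv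
          exact fun hxy => h.1 (hxy ▸ hy))]
      rw [PySem.Dict.getD_insert_self]
      simp
    · rw [ih _ h.2, PySem.Dict.getD_insert_of_ne _ _ _ (fun e => hk e.symm)]
      have hne : ¬ (x = k) := fun e => hk e.symm
      simp [hne]

theorem getD_removeMatch (hand m : List Int) (x : Int) :
    (removeMatch hand m).getD x 0 = (hand.count x : Int) - (m.count x : Int) := by
  rw [removeMatch, PySem.Dict.items_counter (κ := Int) m,
    getD_foldl_sub_keys _ _ _ _ (PySem.Set.nodup_ofList m), PySem.Dict.getD_counter]
  by_cases hx : x ∈ m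
  · simp [PySem.Set.mem_ofList, hx]
  · simp [PySem.Set.mem_ofList, hx, List.count_eq_zero_of_not_mem hx]

theorem count_quad (x a b c e : Int) :
    (([a, b, c, e] : List Int).count x : Int)
      = (if x = a then 1 else 0) + (if x = b then 1 else 0) + (if x = c then 1 else 0)
        + (if x = e then 1 else 0) := by
  simp [List.count_cons]
  split_ifs <;> omega

theorem fourok_char (d : PySem.Dict Int Int) (i : Int) (hr2 : 0 ≤ d.getD 2 0) :
    fourok d i = (if i = 2 then decide (d.getD 2 0 ≥ 4)
                  else decide (d.getD 2 0 ≥ 4 - max 0 (min 4 (d.getD i 0)))) := by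
  rw [Bool.eq_iff_iff]
  by_cases hi : i = 2
  · subst hi
    rw [if_pos rfl]
    simp only [fourok, List.any_eq_true, List.mem_cons, List.not_mem_nil, or_false,
      containsAllC_iff, decide_eq_true_eq]
    constructor
    · rintro ⟨m, hm, hc⟩
      rcases hm with rfl | rfl | rfl | rfl | rfl <;>
        · have := hc 2 (by simp)
          rw [count_quad] at this
          split_ifs at this <;> omega
    · intro h
      refine ⟨[2,2,2,2], by simp, fun x hx => ?_⟩
      simp at hx; subst hx
      rw [count_quad]; split_ifs <;> omega
  · have key : ∀ a b : Int, 0 ≤ a →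
        ((a ≥ 4 - max 0 (min 4 b)) ↔
          (4 ≤ b ∨ (3 ≤ b ∧ 1 ≤ a) ∨ (2 ≤ b ∧ 2 ≤ a) ∨ (1 ≤ b ∧ 3 ≤ a) ∨ 4 ≤ a)) := by
      intro a b ha
      simp only [Int.max_def, Int.min_def]
      split_ifs <;> omega
    simp only [fourok, List.any_eq_true, List.mem_cons, List.not_mem_nil, or_false,
      containsAllC_iff, if_neg hi, decide_eq_true_eq]
    rw [key _ _ hr2]
    constructor
    · rintro ⟨m, hm, hc⟩
      rcases hm with rfl | rfl | rfl | rfl | rfl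
      · have hci := hc i (by simp)
        rw [count_quad] at hci
        left; split_ifs at hci <;> omega
      · have hci := hc i (by simp)
        have hc2 := hc 2 (by simp)
        rw [count_quad] at hci hc2
        right; left
        split_ifs at hci hc2 <;> omega
      · have hci := hc i (by simp)
        have hc2 := hc 2 (by simp)
        rw [count_quad] at hci hc2
        right; right; left
        split_ifs at hci hc2 <;> omega
      · have hci := hc i (by simp)
        have hc2 := hc 2 (by simp)
        rw [count_quad] at hci hc2
        right; right; right; left
        split_ifs at hci hc2 <;> omega
      · have hc2 := hc 2 (by simp)
        rw [count_quad] at hc2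
        right; right; right; right
        split_ifs at hc2 <;> omega
    · rintro (h | ⟨h1, h2⟩ | ⟨h1, h2⟩ | ⟨h1, h2⟩ | h)
      · refine ⟨[i,i,i,i], by simp, fun x hx => ?_⟩
        simp at hx; subst hx
        rw [count_quad]; split_ifs <;> omega
      · refine ⟨[i,i,i,2], by simp, fun x hx => ?_⟩
        simp at hx
        rcases hx with rfl | rfl <;> · rw [count_quad]; split_ifs <;> omega
      · refine ⟨[i,i,2,2], by simp, fun x hx => ?_⟩
        simp at hx
        rcases hx with rfl | rfl <;> · rw [count_quad]; split_ifs <;> omega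
      · refine ⟨[i,2,2,2], by simp, fun x hx => ?_⟩
        simp at hx
        rcases hx with rfl | rfl <;> · rw [count_quad]; split_ifs <;> omega
      · refine ⟨[2,2,2,2], by simp, fun x hx => ?_⟩
        simp at hx; subst hx
        rw [count_quad]; split_ifs <;> omega

theorem sat_eq (hand : List Int) (c k : Int) (m : List Int)
    (hk2 : 2 ≤ k) (hk4 : k ≤ 4)
    (hcnt : ∀ x : Int, (m.count x : Int) = (if x = c then k else 0) + (if x = 2 then 6 - k else 0)) :
    containsAll hand m = satB hand c k := by
  rw [Bool.eq_iff_iff, containsAll_iff]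
  unfold satB
  by_cases hc : c = 2
  · subst hc
    rw [if_pos rfl]
    have h2m : (2 : Int) ∈ m := by
      have h6 := hcnt 2
      simp at h6
      have : 0 < m.count 2 := by omega
      exact List.count_pos_iff.mp this
    constructor
    · intro h
      have := h 2 h2m
      rw [hcnt 2] at this
      simp at this ⊢
      omega
    · intro h x hx
      rw [hcnt x]
      by_cases hx2 : x = 2
      · subst hx2; simp at h ⊢; omega
      · simp [hx2]
  · rw [if_neg hc]
    have hcm : c ∈ m := by
      have := hcnt c
      simp [hc] at this
      have : 0 < m.count c := by omega
      exact List.count_pos_iff.mp this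
    have h2m : (2 : Int) ∈ m := by
      have := hcnt 2
      simp at this
      have : 0 < m.count 2 := by omega
      exact List.count_pos_iff.mp this
    constructor
    · intro h
      have h1 := h c hcm
      have h2 := h 2 h2m
      rw [hcnt c] at h1
      rw [hcnt 2] at h2
      simp [hc] at h1 h2 ⊢
      omega
    · intro h x hx
      rw [hcnt x]
      simp at h
      by_cases hxc : x = c
      · subst hxc; simp [hc]; omega
      · by_cases hx2 : x = 2
        · subst hx2; simp; omega
        · simp [hxc, hx2]

theorem pattern_eq (hand : List Int) (c k : Int) (m L : List Int)
    (hk2 : 2 ≤ k) (hk4 : k ≤ 4)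
    (hcnt : ∀ x : Int, (m.count x : Int) = (if x = c then k else 0) + (if x = 2 then 6 - k else 0)) :
    (containsAll hand m && L.any (fun i => fourok (removeMatch hand m) i))
      = (satB hand c k && L.any (fun i => bodyB hand c k i)) := by
  have hsat := sat_eq hand c k m hk2 hk4 hcnt
  cases hsb : satB hand c k with
  | false => rw [hsat, hsb]; simp
  | true =>
    have hs0 : containsAll hand m = true := by rw [hsat, hsb]
    rw [hsat, hsb]
    simp only [Bool.true_and]
    have hcle := (containsAll_iff hand m).mp hs0
    have h2m : (2 : Int) ∈ m := by
      have := hcnt 2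
      simp at this
      have : 0 < m.count 2 := by omega
      exact List.count_pos_iff.mp this
    have hr2 : 0 ≤ (removeMatch hand m).getD 2 0 := by
      rw [getD_removeMatch]
      have := hcle 2 h2m
      omega
    apply PySem.List.any_congr_mem
    intro i _
    rw [fourok_char _ _ hr2]
    have hgd : ∀ x, (removeMatch hand m).getD x 0 = rB hand c k x := by
      intro x
      rw [getD_removeMatch, hcnt x]
      simp only [rB]
      split_ifs <;> ring
    simp only [bodyB, hgd]

-- the heart of the equivalence: A's three-split scan equals B's greedy split + rank pass
theorem core_eq (hand : List Int) (c : Int) :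
    ((satB hand c 4 && (PySem.List.pyRange 2 c 1 ++ PySem.List.pyRange (c + 1) 15 1).any (bodyB hand c 4)) ||
     ((satB hand c 3 && (PySem.List.pyRange 2 c 1 ++ PySem.List.pyRange (c + 1) 15 1).any (bodyB hand c 3)) ||
      (satB hand c 2 && (PySem.List.pyRange 2 c 1 ++ PySem.List.pyRange (c + 1) 15 1).any (bodyB hand c 2))))
    = (let counts := PySem.Dict.counter hand
       let naturals : Int := if c = 2 then 6 else min 4 (counts.getD c 0)
       let wildsUsed : Int := 6 - (if c = 2 then 0 else naturals)
       if naturals < 2 || counts.getD c 0 < naturals || counts.getD 2 0 < wildsUsed then false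
       else
         let spare := counts.getD 2 0 - wildsUsed
         if 4 ≤ spare then true
         else
           let need := 4 - spare
           counts.items.any (fun rn =>
             !(rn.1 == 2) &&
               ((decide (2 ≤ rn.1) && decide (rn.1 < c)) ||
                 (decide (c < rn.1) && decide (rn.1 < 15))) &&
               decide (need ≤ rn.2))) := by
  rw [Bool.eq_iff_iff]
  simp only [PySem.Dict.getD_counter, PySem.Dict.items_counter, satB, bodyB, rB,
    Bool.or_eq_true, Bool.and_eq_true, List.any_eq_true, List.mem_append,
    PySem.List.mem_pyRange_one, decide_eq_true_eq]
  have hmem : ∀ i : Int, (1 : Int) ≤ (hand.count i : Int) → i ∈ hand := by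
    intro i h
    exact List.count_pos_iff.mp (by omega)
  by_cases hc : c = 2
  · subst hc
    simp only [reduceIte, decide_eq_true_eq]
    split_ifs with hg hs
    · refine iff_of_false ?_ (by simp)
      rintro (⟨h6, -⟩ | ⟨h6, -⟩ | ⟨h6, -⟩) <;> omega
    · refine iff_of_true ?_ rfl
      left
      refine ⟨by omega, 3, Or.inr ⟨by omega, by omega⟩, ?_⟩
      rw [if_neg (by norm_num)]
      simp only [decide_eq_true_eq]
      omega
    · simp only [List.any_eq_true, List.mem_map, PySem.Set.mem_ofList, Bool.and_eq_true,
        Bool.or_eq_true, decide_eq_true_eq, Bool.not_eq_eq_eq_not, Bool.not_true,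
        beq_eq_false_iff_ne, ne_eq]
      constructor
      · rintro (⟨h6, i, hreg, hbody⟩ | ⟨h6, i, hreg, hbody⟩ | ⟨h6, i, hreg, hbody⟩) <;>
        · have hi2 : ¬ i = 2 := by omega
          rw [if_neg hi2] at hbody
          simp only [decide_eq_true_eq] at hbody
          refine ⟨(i, (hand.count i : Int)), ⟨i, hmem i (by omega), rfl⟩, ⟨hi2, by omega⟩, by omega⟩
      · rintro ⟨x, ⟨a, ha, rfl⟩, ⟨hne, hreg⟩, hcnt⟩
        refine Or.inl ⟨by omega, a, by omega, ?_⟩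
        rw [if_neg hne]
        simp only [decide_eq_true_eq]
        omega
  · simp only [if_neg hc, if_neg (fun h : (2:Int) = c => hc h.symm), if_true,
      decide_eq_true_eq, Bool.and_eq_true]
    split_ifs with hg hs
    · refine iff_of_false ?_ (by simp)
      rintro (⟨⟨h1, h2⟩, -⟩ | ⟨⟨h1, h2⟩, -⟩ | ⟨⟨h1, h2⟩, -⟩) <;> omega
    · refine iff_of_true ?_ rfl
      by_cases h4 : (4:Int) ≤ (hand.count c : Int)
      · refine Or.inl ⟨⟨by omega, by omega⟩, 2, by omega, ?_⟩
        rw [if_pos rfl]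
        simp only [decide_eq_true_eq]
        omega
      · by_cases h3 : (3:Int) ≤ (hand.count c : Int)
        · refine Or.inr (Or.inl ⟨⟨by omega, by omega⟩, 2, by omega, ?_⟩)
          rw [if_pos rfl]
          simp only [decide_eq_true_eq]
          omega
        · refine Or.inr (Or.inr ⟨⟨by omega, by omega⟩, 2, by omega, ?_⟩)
          rw [if_pos rfl]
          simp only [decide_eq_true_eq]
          omega
    · simp only [List.any_eq_true, List.mem_map, PySem.Set.mem_ofList, Bool.and_eq_true,
        Bool.or_eq_true, decide_eq_true_eq, Bool.not_eq_eq_eq_not, Bool.not_true,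
        beq_eq_false_iff_ne, ne_eq]
      constructor
      · rintro (⟨⟨h1, h2⟩, i, hreg, hbody⟩ | ⟨⟨h1, h2⟩, i, hreg, hbody⟩ | ⟨⟨h1, h2⟩, i, hreg, hbody⟩) <;>
        · have hic : ¬ i = c := by omega
          by_cases hi2 : i = 2
          · rw [if_pos hi2] at hbody
            simp only [decide_eq_true_eq] at hbody
            omega
          · rw [if_neg hi2, if_neg hic] at hbody
            simp only [decide_eq_true_eq] at hbody
            refine ⟨(i, (hand.count i : Int)), ⟨i, hmem i (by omega), rfl⟩, ⟨hi2, by omega⟩, by omega⟩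
      · rintro ⟨x, ⟨a, ha, rfl⟩, ⟨hne, hreg⟩, hcnt⟩
        have hac : ¬ a = c := by omega
        by_cases h4 : (4:Int) ≤ (hand.count c : Int)
        · refine Or.inl ⟨⟨by omega, by omega⟩, a, by omega, ?_⟩
          rw [if_neg hne, if_neg hac]
          simp only [decide_eq_true_eq]
          omega
        · by_cases h3 : (3:Int) ≤ (hand.count c : Int)
          · refine Or.inr (Or.inl ⟨⟨by omega, by omega⟩, a, by omega, ?_⟩)
            rw [if_neg hne, if_neg hac]
            simp only [decide_eq_true_eq]
            omega
          · refine Or.inr (Or.inr ⟨⟨by omega, by omega⟩, a, by omega, ?_⟩)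
            rw [if_neg hne, if_neg hac]
            simp only [decide_eq_true_eq]
            omega


-- ===== VERDICT (by name: the statement is the Claim_ definition above) =====
theorem brimminghouse_spec : Claim_equal_brimminghouse := by
  intro hand c _
  unfold Spec_brimminghouse brimminghouse brimminghouse_alt
  by_cases hlen : hand.length < 10
  · simp [hlen]
  · simp only [if_neg hlen]
    simp only [List.any_cons, List.any_nil, Bool.or_false]
    rw [pattern_eq hand c 4 [c, c, c, c, 2, 2] _ (by norm_num) (by norm_num)
          (by intro x; simp [List.count_cons]; split_ifs <;> omega),
        pattern_eq hand c 3 [c, c, c, 2, 2, 2] _ (by norm_num) (by norm_num)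
          (by intro x; simp [List.count_cons]; split_ifs <;> omega),
        pattern_eq hand c 2 [c, c, 2, 2, 2, 2] _ (by norm_num) (by norm_num)
          (by intro x; simp [List.count_cons]; split_ifs <;> omega)]
    exact core_eq hand c
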